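-- pv_equiv track=rewrite | github.com/FoCDoT-Tech/protocols | 05-kubernetes-cloud-native-protocols/5.3-cni/network_policy.py | _matches_selector
-- ===== SOURCE A (Python) =====
-- from typing import Dict, Any, List, Set, Optional
--
-- def _matches_selector(labels: Dict[str, str],
--                      selector: Dict[str, str]) -> bool:
--     """Check if labels match selector"""
--     if not selector:  # Empty selector matches all
--         return True
--
--     for key, value in selector.items():
--         if labels.get(key) != value:
--             return False
--     return True
-- ===== SOURCE B (Python) =====
-- def _matches_selector(labels, selector):
--     """Check if labels match selector"""
--     satisfied = sum(1 for k, v in labels.items() if selector.get(k) == v)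
--     return satisfied == len(selector)
-- ===== Notes on version B (the rewrite author's own statement) =====
-- stated objective: alternative
-- what changed: Instead of scanning the selector and looking each key up in labels, B scans the labels dict once, counts the label entries the selector agrees on, and compares that count with the selector's size; correctness rests on selector keys being distinct, so full agreement holds iff the count reaches len(selector).
import Mathlib
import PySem

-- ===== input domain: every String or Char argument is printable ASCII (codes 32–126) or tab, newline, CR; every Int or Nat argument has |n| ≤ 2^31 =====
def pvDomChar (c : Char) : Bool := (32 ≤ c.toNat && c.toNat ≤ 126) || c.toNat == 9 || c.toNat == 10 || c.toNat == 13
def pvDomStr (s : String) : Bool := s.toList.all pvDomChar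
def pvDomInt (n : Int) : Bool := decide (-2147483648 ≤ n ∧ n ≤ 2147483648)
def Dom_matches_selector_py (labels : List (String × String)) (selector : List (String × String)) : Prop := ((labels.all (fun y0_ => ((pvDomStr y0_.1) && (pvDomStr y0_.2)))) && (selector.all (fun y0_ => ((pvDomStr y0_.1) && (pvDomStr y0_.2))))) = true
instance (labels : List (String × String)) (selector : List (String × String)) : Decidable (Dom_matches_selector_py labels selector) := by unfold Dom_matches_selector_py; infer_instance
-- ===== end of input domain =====

-- B traverses the labels dict once, counting entries the selector agrees on, and compares the count with the selector's size (alternative decomposition, same cost).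


-- ===== PORT A =====
-- the 'for key, value in selector.items(): if labels.get(key) != value: return False' loop
def matchesLoopA (labels : PySem.Dict String String) : List (String × String) → Bool
  | [] => true
  | (key, value) :: rest =>
      if (labels.get? key) ≠ some value then false
      else matchesLoopA labels rest

def matches_selector_py (labels : List (String × String)) (selector : List (String × String)) : Bool :=
  if selector.isEmpty then true
  else matchesLoopA (PySem.Dict.mk labels) selector

-- ===== PORT B =====
-- satisfied = sum(1 for k, v in labels.items() if selector.get(k) == v); return satisfied == len(selector)
def matches_selector_py_alt (labels : List (String × String)) (selector : List (String × String)) : Bool :=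
  let sdict := PySem.Dict.mk selector
  let satisfied :=
    labels.foldl (fun acc kv => if sdict.get? kv.1 == some kv.2 then acc + 1 else acc) (0 : Nat)
  satisfied == selector.length

-- ===== PRECONDITION & SPEC =====
-- Pre_ excludes association lists whose label or selector keys repeat: a Python dict cannot
-- contain duplicate keys, so such lists represent no Python input; there the two dict-backed
-- strategies could legitimately disagree.
def Pre_matches_selector_py (labels : List (String × String)) (selector : List (String × String)) : Prop :=
  (labels.map Prod.fst).Nodup ∧ (selector.map Prod.fst).Nodup
instance (labels : List (String × String)) (selector : List (String × String)) : Decidable (Pre_matches_selector_py labels selector) := by unfold Pre_matches_selector_py; infer_instance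

def pvWitness_matches_selector_py : (List (String × String)) × (List (String × String)) :=
  ([("app", "web"), ("tier", "front")], [("app", "web")])

def Spec_matches_selector_py (labels : List (String × String)) (selector : List (String × String)) (out : Bool) : Prop := out = matches_selector_py_alt labels selector
instance (labels : List (String × String)) (selector : List (String × String)) (out : Bool) : Decidable (Spec_matches_selector_py labels selector out) := by unfold Spec_matches_selector_py; infer_instance

-- ===== CLAIM (what is proved, stated in full; the proofs are below) =====
def Claim_equal_matches_selector_py : Prop := ∀ (labels : List (String × String)) (selector : List (String × String)), Dom_matches_selector_py labels selector → Pre_matches_selector_py labels selector → Spec_matches_selector_py labels selector (matches_selector_py labels selector)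

-- ===== LEMMAS AND PROOFS =====

-- A's loop checks every selector pair is a labels item
theorem matchesLoopA_eq_all (labels : List (String × String))
    (hnd : (labels.map Prod.fst).Nodup) :
    ∀ sel : List (String × String),
      matchesLoopA (PySem.Dict.mk labels) sel = sel.all (fun kv => decide (kv ∈ labels)) := by
  intro sel
  induction sel with
  | nil => rfl
  | cons kv rest ih =>
      obtain ⟨k, v⟩ := kv
      have hkeys : (PySem.Dict.mk labels).keys.Nodup := hnd
      simp only [matchesLoopA, List.all_cons, ih]
      have hiff := PySem.Dict.get?_eq_some_iff_mem_items (d := PySem.Dict.mk labels) k v hkeys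
      by_cases h : (PySem.Dict.mk labels).get? k = some v
      · have hmem : (k, v) ∈ labels := hiff.mp h
        simp [h, hmem]
      · have hnmem : (k, v) ∉ labels := fun hmem => h (hiff.mpr hmem)
        simp [h, hnmem]

-- B's fold is a countP
theorem foldl_count_eq_countP {α : Type} (p : α → Bool) :
    ∀ (l : List α) (n : Nat),
      l.foldl (fun acc x => if p x then acc + 1 else acc) n = n + l.countP p := by
  intro l
  induction l with
  | nil => simp
  | cons x rest ih =>
      intro n
      by_cases h : p x
      · simp [List.foldl, h, ih]; omega
      · simp [List.foldl, h, ih]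

-- two nodup lists count each other's members equally
theorem countP_mem_comm (l s : List (String × String))
    (hl : l.Nodup) (hs : s.Nodup) :
    l.countP (fun x => decide (x ∈ s)) = s.countP (fun x => decide (x ∈ l)) := by
  have hperm : List.Perm (l.filter (fun x => decide (x ∈ s))) (s.filter (fun x => decide (x ∈ l))) := by
    rw [List.perm_ext_iff_of_nodup (hl.filter _) (hs.filter _)]
    intro a
    simp only [List.mem_filter, decide_eq_true_eq]
    exact ⟨fun ⟨h1, h2⟩ => ⟨h2, h1⟩, fun ⟨h1, h2⟩ => ⟨h2, h1⟩⟩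
  simpa [List.countP_eq_length_filter] using hperm.length_eq

-- ===== VERDICT (by name: the statement is the Claim_ definition above) =====
theorem matches_selector_py_spec : Claim_equal_matches_selector_py := by
  intro labels selector _ hpre
  obtain ⟨hlab, hsel⟩ := hpre
  unfold Spec_matches_selector_py matches_selector_py matches_selector_py_alt
  -- rewrite B's fold to a membership count of selector's pairs
  have hskeys : (PySem.Dict.mk selector).keys.Nodup := hsel
  have hpred : ∀ kv : String × String,
      ((PySem.Dict.mk selector).get? kv.1 == some kv.2) = decide (kv ∈ selector) := by
    intro kv
    have hiff := PySem.Dict.get?_eq_some_iff_mem_items (d := PySem.Dict.mk selector) kv.1 kv.2 hskeys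
    by_cases h : (PySem.Dict.mk selector).get? kv.1 = some kv.2
    · simp [h, hiff.mp h]
    · have : kv ∉ selector := fun hm => h (hiff.mpr hm)
      simp [h, this]
  have hfold :
      labels.foldl (fun acc kv =>
          if ((PySem.Dict.mk selector).get? kv.1 == some kv.2) then acc + 1 else acc) (0 : Nat)
        = labels.countP (fun kv => decide (kv ∈ selector)) := by
    have := foldl_count_eq_countP
      (fun kv : String × String => ((PySem.Dict.mk selector).get? kv.1 == some kv.2)) labels 0
    rw [this, Nat.zero_add]
    exact List.countP_congr (fun kv _ => by rw [hpred kv])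
  have hcomm := countP_mem_comm labels selector (hlab.of_map) (hsel.of_map)
  simp only [hfold, hcomm]
  by_cases hempty : selector.isEmpty
  · cases selector with
    | nil => simp
    | cons a l => simp [List.isEmpty] at hempty
  · rw [if_neg hempty, matchesLoopA_eq_all labels hlab selector]
    by_cases hall : ∀ a ∈ selector, a ∈ labels
    · have hcount : selector.countP (fun x => decide (x ∈ labels)) = selector.length :=
        List.countP_eq_length.mpr (fun a ha => by simpa using hall a ha)
      have h1 : selector.all (fun kv => decide (kv ∈ labels)) = true := by
        simp only [List.all_eq_true]; intro a ha; simpa using hall a ha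
      simp [h1, hcount]
    · have hcount : selector.countP (fun x => decide (x ∈ labels)) ≠ selector.length := by
        intro heq
        exact hall (fun a ha => by simpa using List.countP_eq_length.mp heq a ha)
      have h1 : selector.all (fun kv => decide (kv ∈ labels)) = false := by
        rw [Bool.eq_false_iff]
        intro hT
        exact hall (fun a ha => by simpa using (List.all_eq_true.mp hT) a ha)
      simp [h1, hcount]
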